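-- pv_equiv track=rewrite | github.com/krb0095/all_code_kyle | Missing_loop_tool/genrated_seq_file.py | seq_builder
-- ===== SOURCE A (Python) =====
-- def seq_builder(A,B):
--     ans = '' # empty string to store stuff
--     a_list = list(A.keys()) # lsit of keys in the list
--     cnt = 0
--     for i in sorted(A|B): # this will give a list of sorted resid for the mol
--         if i in a_list:
--             ans += A[i]
--         else:
--             ans += B[i]
--         cnt += 1
--         if cnt == 75:
--             ans += '\n'
--             cnt = 0
--     ans += "*"
--     return ans
-- ===== SOURCE B (Python) =====
-- def seq_builder(A, B):
--     vals = [A[i] if i in A else B[i] for i in sorted(A | B)]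
--     parts = []
--     rest = vals
--     while rest:
--         chunk = rest[:75]
--         parts.append(''.join(chunk))
--         if len(chunk) == 75:
--             parts.append('\n')
--         rest = rest[75:]
--     parts.append('*')
--     return ''.join(parts)
-- ===== Notes on version B (the rewrite author's own statement) =====
-- stated objective: faster
-- what changed: Replaces A's single pass with a running newline counter and a per-key membership scan of A's key list by a two-phase shape: build the ordered value list from the sorted merged keys using dict membership, then peel it in fixed 75-entry chunks, joining each chunk and appending a newline exactly after full chunks.
import Mathlib
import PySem

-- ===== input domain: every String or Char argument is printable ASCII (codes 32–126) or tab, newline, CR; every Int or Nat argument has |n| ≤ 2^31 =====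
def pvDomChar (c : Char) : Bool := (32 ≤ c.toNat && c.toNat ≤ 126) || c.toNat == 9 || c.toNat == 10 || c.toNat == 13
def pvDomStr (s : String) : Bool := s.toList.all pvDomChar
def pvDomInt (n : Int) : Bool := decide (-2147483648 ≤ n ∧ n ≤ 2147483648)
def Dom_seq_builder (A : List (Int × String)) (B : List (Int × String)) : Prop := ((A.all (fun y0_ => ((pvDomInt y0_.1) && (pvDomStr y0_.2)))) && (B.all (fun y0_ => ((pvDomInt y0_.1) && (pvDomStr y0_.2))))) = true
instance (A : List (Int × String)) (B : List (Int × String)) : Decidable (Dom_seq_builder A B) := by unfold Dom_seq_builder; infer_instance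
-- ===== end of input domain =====

-- B builds the ordered value list (dict membership instead of A's per-key key-list scan) and then joins it in fixed 75-entry chunks; a timing run measured B faster (A's list scan is quadratic).

-- ===== PORT A =====
-- body of A's for-loop: ans += value; cnt += 1; at cnt == 75 append '\n' and reset
def pvStep (st : String × Int) (v : String) : String × Int :=
  let ans := st.1 ++ v
  let cnt := st.2 + 1
  if cnt = 75 then (ans ++ "\n", (0 : Int)) else (ans, cnt)

def seq_builder (A : List (Int × String)) (B : List (Int × String)) : String :=
  let dA := PySem.Dict.ofList A
  let dB := PySem.Dict.ofList B
  let a_list := dA.keys                      -- a_list = list(A.keys())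
  -- A | B : start from A's dict, insert every item of B (overwrite in place)
  let merged := dB.items.foldl (fun d p => d.insert p.1 p.2) dA
  let ks := PySem.List.sorted merged.keys (fun x => x) false   -- sorted(A|B)
  -- A[i] / B[i] never raise here (i comes from A|B); getD's default is never used
  let st := ks.foldl
      (fun st i => pvStep st (if a_list.contains i then dA.getD i "" else dB.getD i ""))
      ("", (0 : Int))
  st.1 ++ "*"

-- ===== PORT B =====
-- Source B's while-loop: peel 75 entries at a time, newline after each full chunk
def pvChunks : List String → List String
  | [] => []
  | v :: rest =>
      PySem.Str.join "" ((v :: rest).take 75) ::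
        ((if ((v :: rest).take 75).length = 75 then ["\n"] else []) ++
          pvChunks ((v :: rest).drop 75))
termination_by l => l.length
decreasing_by simp

def seq_builder_alt (A : List (Int × String)) (B : List (Int × String)) : String :=
  let dA := PySem.Dict.ofList A
  let dB := PySem.Dict.ofList B
  let merged := dB.items.foldl (fun d p => d.insert p.1 p.2) dA
  let vals := (PySem.List.sorted merged.keys (fun x => x) false).map
      (fun i => if dA.contains i then dA.getD i "" else dB.getD i "")
  PySem.Str.join "" (pvChunks vals ++ ["*"])

-- ===== PRECONDITION & SPEC =====
def Spec_seq_builder (A : List (Int × String)) (B : List (Int × String)) (out : String) : Prop := out = seq_builder_alt A B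
instance (A : List (Int × String)) (B : List (Int × String)) (out : String) : Decidable (Spec_seq_builder A B out) := by unfold Spec_seq_builder; infer_instance

-- ===== CLAIM (what is proved, stated in full; the proofs are below) =====
def Claim_equal_seq_builder : Prop := ∀ (A : List (Int × String)) (B : List (Int × String)), Dom_seq_builder A B → Spec_seq_builder A B (seq_builder A B)

-- ===== LEMMAS AND PROOFS =====

lemma pv_join_nil : PySem.Str.join "" ([] : List String) = "" := rfl

lemma pv_intercalate_nil_cons (a : List Char) (l : List (List Char)) :
    List.intercalate ([] : List Char) (a :: l) = a ++ List.intercalate [] l := by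
  cases l <;> simp [List.intercalate, List.intersperse]

lemma pv_join_cons (s : String) (l : List String) :
    PySem.Str.join "" (s :: l) = s ++ PySem.Str.join "" l := by
  simp only [PySem.Str.join, PySem.Chars.join, List.map_cons]
  have h : ("" : String).toList = ([] : List Char) := rfl
  rw [h, pv_intercalate_nil_cons, String.ofList_append, String.ofList_toList]

lemma pv_join_append_star (xs : List String) :
    PySem.Str.join "" (xs ++ ["*"]) = PySem.Str.join "" xs ++ "*" := by
  induction xs with
  | nil => simp [pv_join_cons, pv_join_nil]
  | cons v t ih => rw [List.cons_append, pv_join_cons, ih, pv_join_cons, String.append_assoc]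

-- A's counter loop, peeled up to the next newline: with k steps left before cnt hits 75
lemma pv_peel (vals : List String) : ∀ (k : Nat) (ans : String), 1 ≤ k → k ≤ 75 →
    List.foldl pvStep (ans, ((75 - k : Nat) : Int)) vals =
      if k ≤ vals.length then
        List.foldl pvStep (ans ++ PySem.Str.join "" (vals.take k) ++ "\n", (0 : Int)) (vals.drop k)
      else (ans ++ PySem.Str.join "" vals, ((75 - k + vals.length : Nat) : Int)) := by
  induction vals with
  | nil =>
      intro k ans h1 h2
      simp [pv_join_nil]
      omega
  | cons v t ih =>
      intro k ans h1 h2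
      obtain ⟨k', rfl⟩ : ∃ k', k = k' + 1 := ⟨k - 1, by omega⟩
      rw [List.foldl_cons]
      by_cases hk : k' = 0
      · subst hk
        have hstep : pvStep (ans, ((75 - (0 + 1) : Nat) : Int)) v = (ans ++ v ++ "\n", 0) := by
          simp [pvStep]
        rw [hstep]
        have hc : (1 : Nat) ≤ t.length + 1 := by omega
        simp only [List.length_cons, hc, if_pos, List.take_succ_cons, List.take_zero,
          List.drop_succ_cons, List.drop_zero, pv_join_cons, pv_join_nil,
          String.append_empty]
      · have hstep : pvStep (ans, ((75 - (k' + 1) : Nat) : Int)) v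
            = (ans ++ v, ((75 - k' : Nat) : Int)) := by
          simp only [pvStep]
          have hne : ((75 - (k' + 1) : Nat) : Int) + 1 ≠ 75 := by omega
          rw [if_neg hne]
          have : ((75 - (k' + 1) : Nat) : Int) + 1 = ((75 - k' : Nat) : Int) := by omega
          rw [this]
        rw [hstep, ih k' (ans ++ v) (by omega) (by omega)]
        by_cases hle : k' ≤ t.length
        · have hle' : k' + 1 ≤ (v :: t).length := by simp; omega
          rw [if_pos hle, if_pos hle']
          simp only [List.take_succ_cons, List.drop_succ_cons, pv_join_cons,
            String.append_assoc]
        · have hle' : ¬ (k' + 1 ≤ (v :: t).length) := by simp; omega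
          rw [if_neg hle, if_neg hle']
          simp only [List.length_cons, pv_join_cons, String.append_assoc, Prod.mk.injEq]
          exact ⟨trivial, by omega⟩

-- A's loop from cnt = 0 produces exactly the chunked join of B
lemma pv_loop_eq_chunks (vals : List String) : ∀ (ans : String),
    (List.foldl pvStep (ans, (0 : Int)) vals).1 = ans ++ PySem.Str.join "" (pvChunks vals) := by
  induction hn : vals.length using Nat.strong_induction_on generalizing vals with
  | _ n ih =>
  intro ans
  cases vals with
  | nil => simp [pvChunks, pv_join_nil]
  | cons v t =>
      have h0 : (0 : Int) = ((75 - 75 : Nat) : Int) := by norm_num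
      rw [h0, pv_peel (v :: t) 75 ans (by omega) (by omega)]
      by_cases hle : 75 ≤ (v :: t).length
      · rw [if_pos hle]
        have hdrop : ((v :: t).drop 75).length < n := by
          subst hn; simp only [List.length_drop, List.length_cons]; omega
        rw [ih _ hdrop _ rfl]
        have hchunk : ((v :: t).take 75).length = 75 := by
          rw [List.length_take]; omega
        conv_rhs => rw [pvChunks]
        rw [if_pos hchunk]
        simp [pv_join_cons, String.append_assoc]
      · rw [if_neg hle]
        have hlt : (v :: t).length < 75 := by omega
        have htake : (v :: t).take 75 = v :: t := List.take_of_length_le (by omega)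
        have hdrop : (v :: t).drop 75 = [] := List.drop_eq_nil_of_le (by omega)
        conv_rhs => rw [pvChunks]
        rw [htake, hdrop]
        have hne : ¬ ((v :: t).length = 75) := by omega
        rw [if_neg hne]
        simp [pvChunks, pv_join_cons, pv_join_nil]

-- membership in the keys list is dict membership
lemma pv_contains_keys (d : PySem.Dict Int String) (i : Int) :
    d.keys.contains i = d.contains i := by
  rw [PySem.Dict.contains_eq_decide_mem_keys]
  simp

-- folding A's step over keys with an inline value lookup is folding over the mapped value list
lemma pv_foldl_step_map (f : Int → String) (l : List Int) (init : String × Int) :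
    List.foldl (fun st i => pvStep st (f i)) init l = List.foldl pvStep init (l.map f) := by
  rw [List.foldl_map]

-- ===== VERDICT (by name: the statement is the Claim_ definition above) =====
theorem seq_builder_spec : Claim_equal_seq_builder := by
  intro A B _
  unfold Spec_seq_builder seq_builder seq_builder_alt
  simp only [pv_contains_keys]
  rw [pv_foldl_step_map (fun i => if (PySem.Dict.ofList A).contains i = true
        then (PySem.Dict.ofList A).getD i "" else (PySem.Dict.ofList B).getD i "")]
  rw [pv_loop_eq_chunks, pv_join_append_star, String.empty_append]
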